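-- pv_equiv track=rewrite | github.com/nguyentran6698/LC_Practice | codesignal/day7/2.py | solution
-- ===== SOURCE A (Python) =====
-- def solution(s):
--     n = len(s)
--     ans = 0
--     for i in range(n - 1):
--         for j in range(i+1,n):
--             s1 = s[0:i]
--             s2 = s[i:j]
--             s3 = s[j:]
--             if (s1 + s2) != (s2 + s3) and (s3 + s1) != (s2 + s3) and (s1+s2) != (s3 + s1):
--                 ans += 1
--     return ans
-- ===== SOURCE B (Python) =====
-- def solution(s):
--     # Faster exact rewrite: a pairwise concatenation can only be equal when the
--     # lengths match, which pins j to one of three values per i; check only those.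
--     n = len(s)
--     ans = 0
--     for i in range(n - 1):
--         bad = 0
--         for j in {n - i, 2 * i, (n + i) // 2}:
--             if i < j < n and (s[:j] == s[i:] or s[j:] + s[:i] == s[i:] or s[:j] == s[j:] + s[:i]):
--                 bad += 1
--         ans += (n - 1 - i) - bad
--     return ans
-- ===== Notes on version B (the rewrite author's own statement) =====
-- stated objective: faster
-- what changed: Instead of testing all O(n^2) splits with O(n) string comparisons each, B uses the fact that equal concatenations must have equal lengths, which pins the failing j to at most three candidate values per i ({n-i, 2i, (n+i)//2}); it counts those bad splits and subtracts from the per-i total n-1-i.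
import Mathlib
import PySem

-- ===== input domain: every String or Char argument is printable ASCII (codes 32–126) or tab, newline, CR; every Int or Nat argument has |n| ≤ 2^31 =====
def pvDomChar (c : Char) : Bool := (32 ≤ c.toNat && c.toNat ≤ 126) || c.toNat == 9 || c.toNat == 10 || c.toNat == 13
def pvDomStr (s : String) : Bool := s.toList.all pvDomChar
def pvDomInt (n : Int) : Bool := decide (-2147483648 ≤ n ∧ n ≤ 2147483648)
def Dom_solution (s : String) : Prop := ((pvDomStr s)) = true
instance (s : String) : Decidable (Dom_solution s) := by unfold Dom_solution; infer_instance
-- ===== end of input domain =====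

-- B checks, per split point i, only the ≤ 3 candidate cut points j where a pairwise
-- concatenation can have matching lengths, instead of comparing strings at every (i, j).

-- ===== PORT A =====
def solution (s : String) : Int :=
  let cs := s.toList
  let n : Int := PySem.Str.len s
  (PySem.List.pyRange 0 (n - 1) 1).foldl (fun ans i =>
    (PySem.List.pyRange (i + 1) n 1).foldl (fun ans j =>
      let s1 := PySem.List.slice cs (some 0) (some i)
      let s2 := PySem.List.slice cs (some i) (some j)
      let s3 := PySem.List.slice cs (some j) none
      if (s1 ++ s2) ≠ (s2 ++ s3) ∧ (s3 ++ s1) ≠ (s2 ++ s3) ∧ (s1 ++ s2) ≠ (s3 ++ s1)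
      then ans + 1 else ans) ans) 0

-- ===== PORT B =====
def solution_alt (s : String) : Int :=
  let cs := s.toList
  let n : Int := PySem.Str.len s
  (PySem.List.pyRange 0 (n - 1) 1).foldl (fun ans i =>
    let cand : PySem.Set Int :=
      PySem.Set.ofList [n - i, 2 * i, PySem.Int.floordiv (n + i) 2]
    let bad : Int := cand.foldl (fun bad j =>
      if i < j ∧ j < n ∧
          (PySem.List.slice cs none (some j) = PySem.List.slice cs (some i) none ∨
           PySem.List.slice cs (some j) none ++ PySem.List.slice cs none (some i)
             = PySem.List.slice cs (some i) none ∨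
           PySem.List.slice cs none (some j)
             = PySem.List.slice cs (some j) none ++ PySem.List.slice cs none (some i))
      then bad + 1 else bad) 0
    ans + ((n - 1 - i) - bad)) 0

-- ===== PRECONDITION & SPEC =====
def Spec_solution (s : String) (out : Int) : Prop := out = solution_alt s
instance (s : String) (out : Int) : Decidable (Spec_solution s out) := by unfold Spec_solution; infer_instance

-- ===== CLAIM (what is proved, stated in full; the proofs are below) =====
def Claim_equal_solution : Prop := ∀ (s : String), Dom_solution s → Spec_solution s (solution s)

-- ===== LEMMAS AND PROOFS =====

-- "some pairwise concatenation of the three parts is equal", in B's slice form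
abbrev pvDisj (cs : List Char) (i j : Int) : Prop :=
  PySem.List.slice cs none (some j) = PySem.List.slice cs (some i) none ∨
  PySem.List.slice cs (some j) none ++ PySem.List.slice cs none (some i)
    = PySem.List.slice cs (some i) none ∨
  PySem.List.slice cs none (some j)
    = PySem.List.slice cs (some j) none ++ PySem.List.slice cs none (some i)

-- equal lists have equal lengths: a failing split lies on one of three lines
lemma pvDisj_pins (cs : List Char) (i j : Int) (h0 : 0 ≤ i) (hij : i < j)
    (hj : j < (cs.length : Int)) (hd : pvDisj cs i j) :
    j = (cs.length : Int) - i ∨ j = 2 * i ∨ j = PySem.Int.floordiv ((cs.length : Int) + i) 2 := by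
  obtain ⟨iN, rfl⟩ := Int.eq_ofNat_of_zero_le h0
  obtain ⟨jN, rfl⟩ := Int.eq_ofNat_of_zero_le (h0.trans hij.le)
  have hiN : iN < jN := by exact_mod_cast hij
  have hjN : jN < cs.length := by exact_mod_cast hj
  simp only [pvDisj, PySem.List.slice_to_natCast, PySem.List.slice_from_natCast] at hd
  have hlen : jN = cs.length - iN ∨ jN = 2 * iN ∨ 2 * jN = cs.length + iN := by
    rcases hd with h | h | h
    · left
      have := congrArg List.length h
      simp only [List.length_take, List.length_drop] at this
      omega
    · right; left
      have := congrArg List.length h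
      simp only [List.length_append, List.length_take, List.length_drop] at this
      omega
    · right; right
      have := congrArg List.length h
      simp only [List.length_append, List.length_take, List.length_drop] at this
      omega
  rcases hlen with h | h | h
  · left; omega
  · right; left; omega
  · right; right
    rw [PySem.Int.floordiv_eq_ediv_of_pos (by norm_num : (0:Int) < 2)]
    omega

-- A's first two concatenations coincide with B's slices
lemma pvConcat_eq (cs : List Char) (i j : Int) (h0 : 0 ≤ i) (hij : i ≤ j) :
    PySem.List.slice cs (some 0) (some i) ++ PySem.List.slice cs (some i) (some j)
      = PySem.List.slice cs none (some j) ∧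
    PySem.List.slice cs (some i) (some j) ++ PySem.List.slice cs (some j) none
      = PySem.List.slice cs (some i) none := by
  obtain ⟨iN, rfl⟩ := Int.eq_ofNat_of_zero_le h0
  obtain ⟨jN, rfl⟩ := Int.eq_ofNat_of_zero_le (h0.trans hij)
  have hle : iN ≤ jN := by exact_mod_cast hij
  simp only [PySem.List.slice_zero_start, PySem.List.slice_to_natCast, PySem.List.slice_natCast,
    PySem.List.slice_from_natCast]
  constructor
  · rw [← List.take_add]
    congr 1
    omega
  · rw [show cs.drop jN = (cs.drop iN).drop (jN - iN) from by rw [List.drop_drop]; congr 1; omega]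
    exact List.take_append_drop _ _

-- per-i equality of the two loop bodies
lemma pvInner_eq (cs : List Char) (i : Int) (h0 : 0 ≤ i) (h1 : i < (cs.length : Int) - 1)
    (ans : Int) :
    (PySem.List.pyRange (i + 1) (cs.length : Int) 1).foldl (fun ans j =>
      if PySem.List.slice cs (some 0) (some i) ++ PySem.List.slice cs (some i) (some j)
           ≠ PySem.List.slice cs (some i) (some j) ++ PySem.List.slice cs (some j) none ∧
         PySem.List.slice cs (some j) none ++ PySem.List.slice cs (some 0) (some i)
           ≠ PySem.List.slice cs (some i) (some j) ++ PySem.List.slice cs (some j) none ∧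
         PySem.List.slice cs (some 0) (some i) ++ PySem.List.slice cs (some i) (some j)
           ≠ PySem.List.slice cs (some j) none ++ PySem.List.slice cs (some 0) (some i)
      then ans + 1 else ans) ans
    = ans + (((cs.length : Int) - 1 - i) -
        (PySem.Set.ofList [(cs.length : Int) - i, 2 * i,
            PySem.Int.floordiv ((cs.length : Int) + i) 2]).foldl (fun bad j =>
          if i < j ∧ j < (cs.length : Int) ∧ pvDisj cs i j then bad + 1 else bad) 0) := by
  simp only [PySem.List.foldl_ite_add_one]
  have hcongr : (PySem.List.pyRange (i + 1) (cs.length : Int) 1).countP (fun j =>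
        decide (PySem.List.slice cs (some 0) (some i) ++ PySem.List.slice cs (some i) (some j)
           ≠ PySem.List.slice cs (some i) (some j) ++ PySem.List.slice cs (some j) none ∧
         PySem.List.slice cs (some j) none ++ PySem.List.slice cs (some 0) (some i)
           ≠ PySem.List.slice cs (some i) (some j) ++ PySem.List.slice cs (some j) none ∧
         PySem.List.slice cs (some 0) (some i) ++ PySem.List.slice cs (some i) (some j)
           ≠ PySem.List.slice cs (some j) none ++ PySem.List.slice cs (some 0) (some i)))
      = (PySem.List.pyRange (i + 1) (cs.length : Int) 1).countP (fun j =>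
        decide (¬ (i < j ∧ j < (cs.length : Int) ∧ pvDisj cs i j))) := by
    refine List.countP_congr ?_
    intro j hj
    rw [PySem.List.mem_pyRange_one] at hj
    have hij : i < j := by omega
    have hc := pvConcat_eq cs i j h0 hij.le
    simp only [decide_eq_true_eq]
    rw [hc.1, hc.2]
    simp only [pvDisj]
    constructor
    · rintro ⟨a, b, c⟩ ⟨_, _, hd⟩
      rcases hd with h | h | h
      · exact a h
      · exact b h
      · exact c h
    · intro hnd
      refine ⟨?_, ?_, ?_⟩ <;> intro h <;> exact hnd ⟨hij, by omega, by tauto⟩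
  rw [hcongr]
  have hflip : (PySem.List.pyRange (i + 1) (cs.length : Int) 1).countP (fun j =>
        decide (¬ (i < j ∧ j < (cs.length : Int) ∧ pvDisj cs i j)))
      + (PySem.List.pyRange (i + 1) (cs.length : Int) 1).countP (fun j =>
        decide (i < j ∧ j < (cs.length : Int) ∧ pvDisj cs i j))
      = (PySem.List.pyRange (i + 1) (cs.length : Int) 1).length := by
    rw [List.length_eq_countP_add_countP
      (p := fun j => decide (i < j ∧ j < (cs.length : Int) ∧ pvDisj cs i j))]
    have he : (PySem.List.pyRange (i + 1) (cs.length : Int) 1).countP (fun j =>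
          decide (¬ (i < j ∧ j < (cs.length : Int) ∧ pvDisj cs i j)))
        = (PySem.List.pyRange (i + 1) (cs.length : Int) 1).countP (fun a =>
          decide ¬(decide (i < a ∧ a < (cs.length : Int) ∧ pvDisj cs i a)) = true) := by
      refine List.countP_congr ?_
      intro x _
      simp
    rw [he]
    omega
  have hRC : (PySem.List.pyRange (i + 1) (cs.length : Int) 1).countP (fun j =>
        decide (i < j ∧ j < (cs.length : Int) ∧ pvDisj cs i j))
      = (PySem.Set.ofList [(cs.length : Int) - i, 2 * i,
            PySem.Int.floordiv ((cs.length : Int) + i) 2]).countP (fun j =>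
        decide (i < j ∧ j < (cs.length : Int) ∧ pvDisj cs i j)) := by
    rw [List.countP_eq_length_filter, List.countP_eq_length_filter]
    refine List.Perm.length_eq ?_
    rw [List.perm_ext_iff_of_nodup
      (List.Nodup.filter _ (PySem.List.nodup_pyRange_one _ _))
      (List.Nodup.filter _ (PySem.Set.nodup_ofList _))]
    intro j
    simp only [List.mem_filter, decide_eq_true_eq]
    constructor
    · rintro ⟨_, hP⟩
      refine ⟨?_, hP⟩
      rw [PySem.Set.mem_ofList]
      obtain ⟨hij, hjn, hd⟩ := hP
      rcases pvDisj_pins cs i j h0 hij hjn hd with h | h | h <;> simp [h]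
    · rintro ⟨_, hP⟩
      refine ⟨?_, hP⟩
      rw [PySem.List.mem_pyRange_one]
      obtain ⟨hij, hjn, _⟩ := hP
      omega
  have hlen : (PySem.List.pyRange (i + 1) (cs.length : Int) 1).length
      = ((cs.length : Int) - (i + 1)).toNat := PySem.List.length_pyRange_one _ _
  omega

-- ===== VERDICT (by name: the statement is the Claim_ definition above) =====
theorem solution_spec : Claim_equal_solution := by
  intro s _
  unfold Spec_solution solution solution_alt
  simp only [PySem.Str.len_eq]
  refine PySem.List.foldl_congr_mem _ _ _ _ ?_
  intro acc i hi
  rw [PySem.List.mem_pyRange_one] at hi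
  exact pvInner_eq s.toList i hi.1 (by omega) acc
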